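-- pv_equiv track=rewrite | github.com/oskarpicus/aplicatie-LC | utile.py | comparatie
-- ===== SOURCE A (Python) =====
-- def comparatie(numar1,numar2):
--     """
--     Compara doua numere date in aceeasi baza de numeratie
--     :param numar1: list
--     :param numar2: list
--     :return: True, daca numar1>=numar2, False, daca numar2<numar1
--     """
--     if len(numar1)>len(numar2):
--         return True
--     elif len(numar2)>len(numar1):
--         return False
--     else:
--         for n,i in enumerate(numar1):
--             if numar1[n]>numar2[n]:
--                 return True
--             elif numar1[n]<numar2[n]:
--                 return False
--     return True
-- ===== SOURCE B (Python) =====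
-- def comparatie(numar1, numar2):
--     """
--     Compara doua numere date in aceeasi baza de numeratie
--     :param numar1: list
--     :param numar2: list
--     :return: True, daca numar1>=numar2, False, daca numar2<numar1
--     """
--     if len(numar1) != len(numar2):
--         return len(numar1) > len(numar2)
--     verdict = True
--     for d1, d2 in zip(reversed(numar1), reversed(numar2)):
--         if d1 != d2:
--             verdict = d1 > d2
--     return verdict
-- ===== Notes on version B (the rewrite author's own statement) =====
-- stated objective: alternative
-- what changed: Instead of A's early-exit left-to-right scan of the first differing digit, B does a full right-to-left pass with a verdict accumulator: every differing digit pair overwrites the verdict, so the last one seen (the most significant difference) decides; equal lengths are handled by one arithmetic comparison instead of a branch chain.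
import Mathlib
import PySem

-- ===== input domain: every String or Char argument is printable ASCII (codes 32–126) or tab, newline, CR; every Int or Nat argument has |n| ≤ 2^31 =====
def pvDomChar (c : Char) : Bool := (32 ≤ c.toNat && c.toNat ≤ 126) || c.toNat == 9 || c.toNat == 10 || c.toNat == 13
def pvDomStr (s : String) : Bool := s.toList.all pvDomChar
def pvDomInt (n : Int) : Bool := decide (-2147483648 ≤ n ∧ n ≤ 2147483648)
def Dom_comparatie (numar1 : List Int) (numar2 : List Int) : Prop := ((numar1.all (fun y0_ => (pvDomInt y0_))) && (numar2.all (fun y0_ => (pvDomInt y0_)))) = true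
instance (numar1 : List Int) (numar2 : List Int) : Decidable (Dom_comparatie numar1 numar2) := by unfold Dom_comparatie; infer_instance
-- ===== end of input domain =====

-- B replaces A's early-exit left-to-right digit scan by a full right-to-left pass that keeps
-- the verdict of the last (most significant) differing digit pair — objective: alternative.


-- ===== PORT A =====
-- `for n,i in enumerate(numar1)` with the early returns: index counter n, body reads
-- numar1[n] and numar2[n] (exact via PySem.List.pyGet?; the loop only runs with equal
-- lengths, so both lookups succeed — the `true` fallback of the match is unreachable).
def comparatieLoop (numar1 numar2 : List Int) : Nat → List Int → Bool
  | _, [] => true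
  | n, _i :: rest =>
    match PySem.List.pyGet? numar1 (n : Int), PySem.List.pyGet? numar2 (n : Int) with
    | some x, some y =>
      if x > y then true
      else if x < y then false
      else comparatieLoop numar1 numar2 (n + 1) rest
    | _, _ => true

def comparatie (numar1 : List Int) (numar2 : List Int) : Bool :=
  if numar1.length > numar2.length then true
  else if numar2.length > numar1.length then false
  else comparatieLoop numar1 numar2 0 numar1

-- ===== PORT B =====
-- Source B: on unequal lengths return len(numar1) > len(numar2); otherwise fold over
-- zip(reversed(numar1), reversed(numar2)) with accumulator `verdict` starting True,
-- overwritten by d1 > d2 at every differing pair (so the last, most significant, wins).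
def comparatie_alt (numar1 : List Int) (numar2 : List Int) : Bool :=
  if numar1.length ≠ numar2.length then decide (numar1.length > numar2.length)
  else
    (numar1.reverse.zip numar2.reverse).foldl
      (fun verdict p => if p.1 ≠ p.2 then decide (p.1 > p.2) else verdict) true

-- ===== PRECONDITION & SPEC =====
def Spec_comparatie (numar1 : List Int) (numar2 : List Int) (out : Bool) : Prop := out = comparatie_alt numar1 numar2
instance (numar1 : List Int) (numar2 : List Int) (out : Bool) : Decidable (Spec_comparatie numar1 numar2 out) := by unfold Spec_comparatie; infer_instance

-- ===== CLAIM (what is proved, stated in full; the proofs are below) =====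
def Claim_equal_comparatie : Prop := ∀ (numar1 : List Int) (numar2 : List Int), Dom_comparatie numar1 numar2 → Spec_comparatie numar1 numar2 (comparatie numar1 numar2)

-- ===== LEMMAS AND PROOFS =====

-- zipping the two reversed lists of equal length = reversing the zip
theorem zip_reverse_eq (as : List Int) : ∀ bs : List Int, as.length = bs.length →
    as.reverse.zip bs.reverse = (as.zip bs).reverse := by
  induction as with
  | nil => intro bs h; cases bs with
    | nil => simp
    | cons b bs => simp at h
  | cons a as ih =>
    intro bs h
    cases bs with
    | nil => simp at h
    | cons b bs =>
      have hlen : as.length = bs.length := by simpa using h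
      simp only [List.reverse_cons]
      rw [List.zip_append (by simp [hlen]), ih bs hlen]
      simp

-- A's loop, started at index p.length into p ++ as / q ++ bs with p,q of equal length,
-- equals the right fold of the pairwise verdict over zip as bs.
theorem comparatieLoop_eq (as : List Int) : ∀ (bs p q : List Int),
    p.length = q.length → as.length = bs.length →
    comparatieLoop (p ++ as) (q ++ bs) p.length as =
      (as.zip bs).foldr (fun p acc => if p.1 ≠ p.2 then decide (p.1 > p.2) else acc) true := by
  induction as with
  | nil =>
    intro bs p q _ hlen
    cases bs with
    | nil => simp [comparatieLoop]
    | cons b bs => simp at hlen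
  | cons a as ih =>
    intro bs p q hpq hlen
    cases bs with
    | nil => simp at hlen
    | cons b bs =>
      have h1 : PySem.List.pyGet? (p ++ a :: as) (p.length : Int) = some a :=
        PySem.List.pyGet?_append_length p as a
      have h2 : PySem.List.pyGet? (q ++ b :: bs) (p.length : Int) = some b := by
        rw [hpq]; exact PySem.List.pyGet?_append_length q bs b
      simp only [comparatieLoop, h1, h2]
      by_cases hgt : a > b
      · simp [hgt, show a ≠ b by omega]
      · by_cases hlt : a < b
        · simp [hlt, show ¬ a > b by omega, show a ≠ b by omega]
        · have hab : a = b := by omega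
          subst hab
          have hidx : p.length + 1 = (p ++ [a]).length := by simp
          have hrec := ih bs (p ++ [a]) (q ++ [a])
            (by simp [hpq]) (by simpa using hlen)
          simp only [List.append_assoc, List.cons_append, List.nil_append] at hrec
          rw [hidx, hrec]
          simp

theorem comparatie_spec : Claim_equal_comparatie := by
  intro numar1 numar2 _
  unfold Spec_comparatie comparatie comparatie_alt
  by_cases h1 : numar1.length > numar2.length
  · simp [h1, Nat.ne_of_gt h1]
  · by_cases h2 : numar2.length > numar1.length
    · simp [show ¬ numar1.length > numar2.length from h1, h2, Nat.ne_of_lt h2]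
    · have hlen : numar1.length = numar2.length := by omega
      have hloop := comparatieLoop_eq numar1 numar2 [] [] rfl hlen
      simp only [List.nil_append, List.length_nil] at hloop
      rw [zip_reverse_eq numar1 numar2 hlen, List.foldl_reverse]
      simp [hlen, hloop]
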